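-- pv_equiv track=rewrite | github.com/sahilcmd3/DSA-Questions | Codes/3068DailyChal.py | maxVal
-- ===== SOURCE A (Python) =====
-- def maxVal(nums, edges, k):
--     base = sum(nums)  # Base sum & compute deltas
--     deltas = [(x ^ k) - x for x in nums]
--     sum_pos = cnt_pos = 0
--     min_pos = float("inf")
--     best_nonpos = float("-inf")
--
--     for d in deltas:  # Collect pos deltas & track smallest pos
--         if d > 0:
--             cnt_pos += 1
--             sum_pos += d
--             min_pos = min(min_pos, d)
--         else:
--             best_nonpos = max(best_nonpos, d)
--
--     if cnt_pos % 2 == 0:  # If count of positives even,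
--         return base + sum_pos  # then we take them all
--
--     loss = min(min_pos, -best_nonpos)  # Else, sacrifice the smaller loss
--
--     return base + sum_pos - loss
-- ===== SOURCE B (Python) =====
-- def maxVal(nums, edges, k):
--     # Two-state parity DP: best total with an even / odd number of XOR-flips.
--     even = 0
--     odd = None  # no prefix with an odd number of flips yet
--     for x in nums:
--         fx = x ^ k
--         if odd is None:
--             even, odd = even + x, even + fx
--         else:
--             even, odd = max(even + x, odd + fx), max(odd + x, even + fx)
--     return even
-- ===== Notes on version B (the rewrite author's own statement) =====
-- stated objective: alternative
-- what changed: Replaced the greedy 'base sum + all positive XOR-deltas minus a parity correction' computation with a forward two-state dynamic program that maintains the best achievable sums with an even and an odd number of flips.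
import Mathlib
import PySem

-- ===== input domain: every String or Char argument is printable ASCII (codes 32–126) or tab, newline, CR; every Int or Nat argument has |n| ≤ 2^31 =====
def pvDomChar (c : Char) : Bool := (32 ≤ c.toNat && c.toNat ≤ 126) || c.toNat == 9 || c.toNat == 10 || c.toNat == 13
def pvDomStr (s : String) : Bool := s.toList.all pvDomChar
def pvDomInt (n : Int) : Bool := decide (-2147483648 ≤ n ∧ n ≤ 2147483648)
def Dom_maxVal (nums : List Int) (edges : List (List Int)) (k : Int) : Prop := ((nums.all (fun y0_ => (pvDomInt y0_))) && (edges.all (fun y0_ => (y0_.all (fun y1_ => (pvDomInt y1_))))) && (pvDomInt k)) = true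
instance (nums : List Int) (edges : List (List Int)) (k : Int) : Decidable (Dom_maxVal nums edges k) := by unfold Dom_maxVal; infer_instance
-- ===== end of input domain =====

-- B replaces A's greedy "base + positive deltas − parity correction" with a two-state parity DP (alternative decomposition, same cost).

-- ===== PORT A =====
-- A's float("inf")/float("-inf") sentinels for min_pos/best_nonpos are modeled exactly by Option Int
-- (none = the sentinel); this is exact because 'loss' is only reached when cnt_pos is odd, where min_pos is finite.
-- state: (sum_pos, cnt_pos, min_pos, best_nonpos)
def pvAstep (s : Int × Int × Option Int × Option Int) (d : Int) : Int × Int × Option Int × Option Int :=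
  if d > 0 then
    (s.1 + d, s.2.1 + 1, some (match s.2.2.1 with | none => d | some v => min v d), s.2.2.2)
  else
    (s.1, s.2.1, s.2.2.1, some (match s.2.2.2 with | none => d | some v => max v d))

-- loss = min(min_pos, -best_nonpos) under the infinity conventions (unused none/none case is 0)
def pvLoss (m b : Option Int) : Int :=
  match m, b with
  | some mv, some bv => min mv (-bv)
  | some mv, none => mv
  | none, some bv => -bv
  | none, none => 0

def maxVal (nums : List Int) (edges : List (List Int)) (k : Int) : Int :=
  let base := nums.sum
  let deltas := nums.map (fun x => PySem.Int.bxor x k - x)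
  let st := deltas.foldl pvAstep (0, 0, none, none)
  if st.2.1 % 2 = 0 then base + st.1
  else base + st.1 - pvLoss st.2.2.1 st.2.2.2

-- ===== PORT B =====
-- state: (even, odd); odd = none models Python's None ("no odd-flip prefix yet")
def pvBstep (k : Int) (s : Int × Option Int) (x : Int) : Int × Option Int :=
  let fx := PySem.Int.bxor x k
  match s.2 with
  | none => (s.1 + x, some (s.1 + fx))
  | some o => (max (s.1 + x) (o + fx), some (max (o + x) (s.1 + fx)))

def maxVal_alt (nums : List Int) (edges : List (List Int)) (k : Int) : Int :=
  (nums.foldl (pvBstep k) (0, none)).1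

-- ===== PRECONDITION & SPEC =====
def Spec_maxVal (nums : List Int) (edges : List (List Int)) (k : Int) (out : Int) : Prop := out = maxVal_alt nums edges k
instance (nums : List Int) (edges : List (List Int)) (k : Int) (out : Int) : Decidable (Spec_maxVal nums edges k out) := by unfold Spec_maxVal; infer_instance

-- ===== CLAIM (what is proved, stated in full; the proofs are below) =====
def Claim_equal_maxVal : Prop := ∀ (nums : List Int) (edges : List (List Int)) (k : Int), Dom_maxVal nums edges k → Spec_maxVal nums edges k (maxVal nums edges k)

-- ===== LEMMAS AND PROOFS =====

-- Invariant tying A's statistics (P, c, m, b) over a prefix with sum S to B's DP state (e, o).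
def pvInv (S : Int) (st : Int × Int × Option Int × Option Int) (bs : Int × Option Int) : Prop :=
  let P := st.1; let c := st.2.1; let m := st.2.2.1; let b := st.2.2.2
  bs.1 = S + (if c % 2 = 0 then P else P - pvLoss m b) ∧
  bs.2 = (if m = none ∧ b = none then none
          else some (S + (if c % 2 = 0 then P - pvLoss m b else P))) ∧
  (m = none → c % 2 = 0) ∧
  (∀ v, m = some v → 0 < v) ∧
  (∀ v, b = some v → v ≤ 0)

theorem pvInv_step (S : Int) (st : Int × Int × Option Int × Option Int) (bs : Int × Option Int)
    (k x : Int) (h : pvInv S st bs) :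
    pvInv (S + x) (pvAstep st (PySem.Int.bxor x k - x)) (pvBstep k bs x) := by
  obtain ⟨P, c, m, b⟩ := st
  obtain ⟨e, o⟩ := bs
  obtain ⟨he, ho, hmc, hm, hb⟩ := h
  simp only at he ho hmc hm hb
  unfold pvInv pvAstep pvBstep
  simp only
  generalize PySem.Int.bxor x k = fx at *
  rcases m with _ | mv <;> rcases b with _ | bv <;> simp only [and_self, reduceCtorEq, if_true, if_false, and_false, false_and] at ho <;> subst he ho
  · -- m = none, b = none : empty prefix, c % 2 = 0
    have hc := hmc rfl
    by_cases hdp : fx - x > 0 <;>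
      simp only [hdp, if_true, if_false, pvLoss, hc] <;>
      split_ifs <;> simp_all <;> omega
  · -- m = none, b = some bv
    have hc := hmc rfl
    have hbv := hb bv rfl
    by_cases hdp : fx - x > 0 <;>
      simp only [hdp, if_true, if_false, pvLoss, hc] <;>
      split_ifs <;> simp_all <;> omega
  · -- m = some mv, b = none
    have hmv := hm mv rfl
    by_cases hdp : fx - x > 0 <;> by_cases hp : c % 2 = 0 <;>
      simp only [hdp, hp, if_true, if_false, pvLoss] <;>
      split_ifs <;> simp_all <;> omega
  · -- m = some mv, b = some bv
    have hmv := hm mv rfl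
    have hbv := hb bv rfl
    by_cases hdp : fx - x > 0 <;> by_cases hp : c % 2 = 0 <;>
      simp only [hdp, hp, if_true, if_false, pvLoss] <;>
      split_ifs <;> simp_all <;> omega

theorem pvInv_fold (k : Int) (ns : List Int) :
    pvInv ns.sum ((ns.map (fun x => PySem.Int.bxor x k - x)).foldl pvAstep (0, 0, none, none))
      (ns.foldl (pvBstep k) (0, none)) := by
  induction ns using List.reverseRecOn with
  | nil => simp [pvInv]
  | append_singleton ns x ih =>
      simpa [List.foldl_append, List.map_append] using pvInv_step ns.sum _ _ k x ih

-- ===== VERDICT (by name: the statement is the Claim_ definition above) =====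
theorem maxVal_spec : Claim_equal_maxVal := by
  intro nums edges k _
  obtain ⟨he, ho, hmc, hm, hb⟩ := pvInv_fold k nums
  unfold Spec_maxVal
  simp only [maxVal, maxVal_alt]
  rw [he]
  split_ifs with h1 <;> ring
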